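-- pv_equiv track=rewrite | github.com/Logeshwaran-U/codevita_13 | t_brk_wl.py | bl_cns
-- ===== SOURCE A (Python) =====
-- def bl_cns(grd, n):
--     cnt = {}
--     drs = [(1,0),(-1,0),(0,1),(0,-1)]
--     for i in range(n):
--         for j in range(n):
--             a = grd[i][j]
--             if a not in cnt:
--                 cnt[a] = set()
--             for dx, dy in drs:
--                 ni, nj = i+dx, j+dy
--                 if 0 <= ni < n and 0 <= nj < n:
--                     b = grd[ni][nj]
--                     if a != b:
--                         cnt[a].add(b)
--     return cnt
-- ===== SOURCE B (Python) =====
-- def bl_cns(grd, n):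
--     pos = {}
--     for i in range(n):
--         for j in range(n):
--             pos.setdefault(grd[i][j], []).append((i, j))
--     cnt = {}
--     for a, cells in pos.items():
--         s = set()
--         for i, j in cells:
--             for ni, nj in ((i + 1, j), (i - 1, j), (i, j + 1), (i, j - 1)):
--                 if 0 <= ni < n and 0 <= nj < n and grd[ni][nj] != a:
--                     s.add(grd[ni][nj])
--         cnt[a] = s
--     return cnt
-- ===== Notes on version B (the rewrite author's own statement) =====
-- stated objective: alternative
-- what changed: A mutates one shared dict while scanning each cell's four neighbours; B first builds an inverted index value -> list of its cell positions, then computes each value's adjacency set independently from its own cells and inserts every key exactly once.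
import Mathlib
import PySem

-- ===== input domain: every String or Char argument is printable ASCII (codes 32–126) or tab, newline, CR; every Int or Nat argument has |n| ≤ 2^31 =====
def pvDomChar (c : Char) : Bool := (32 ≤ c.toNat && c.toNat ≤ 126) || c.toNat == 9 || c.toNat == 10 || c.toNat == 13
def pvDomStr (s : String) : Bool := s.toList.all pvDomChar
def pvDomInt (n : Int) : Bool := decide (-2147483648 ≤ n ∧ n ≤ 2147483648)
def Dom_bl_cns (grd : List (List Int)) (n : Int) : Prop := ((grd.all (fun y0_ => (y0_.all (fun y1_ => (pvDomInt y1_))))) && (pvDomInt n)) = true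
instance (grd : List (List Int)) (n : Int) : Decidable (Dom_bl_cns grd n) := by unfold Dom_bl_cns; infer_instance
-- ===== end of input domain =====

-- B replaces A's single scan that mutates one shared dict per neighbour by a two-stage
-- algorithm: an inverted index value -> its cell positions, then one independent
-- adjacency-set computation and a single insert per value (objective: alternative).

-- ===== PORT A =====
-- A's `cnt[a].add(b)` is ported as `modify a []`; at that point the key `a` is always
-- present (created just above), so the default [] is never consulted and the port is exact.
def pvDrs : List (Int × Int) := [(1,0),(-1,0),(0,1),(0,-1)]

def pvDirStep (grd : List (List Int)) (n a i j : Int)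
    (cnt : PySem.Dict Int (PySem.Set Int)) (d : Int × Int) : PySem.Dict Int (PySem.Set Int) :=
  if 0 ≤ i + d.1 ∧ i + d.1 < n ∧ 0 ≤ j + d.2 ∧ j + d.2 < n then
    if a ≠ PySem.List.pyGetD (PySem.List.pyGetD grd (i + d.1) []) (j + d.2) 0 then
      cnt.modify a [] (fun s => PySem.Set.add s (PySem.List.pyGetD (PySem.List.pyGetD grd (i + d.1) []) (j + d.2) 0))
    else cnt
  else cnt

def pvCellA (grd : List (List Int)) (n : Int)
    (cnt : PySem.Dict Int (PySem.Set Int)) (i j : Int) : PySem.Dict Int (PySem.Set Int) :=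
  let a := PySem.List.pyGetD (PySem.List.pyGetD grd i []) j 0
  pvDrs.foldl (pvDirStep grd n a i j)
    (if cnt.contains a then cnt else cnt.insert a PySem.Set.empty)

def bl_cns (grd : List (List Int)) (n : Int) : List (Int × List Int) :=
  ((PySem.List.pyRange 0 n 1).foldl (fun cnt i =>
      (PySem.List.pyRange 0 n 1).foldl (fun cnt j => pvCellA grd n cnt i j) cnt)
    PySem.Dict.empty).items

-- ===== PORT B =====
def pvVal (grd : List (List Int)) (i j : Int) : Int :=
  PySem.List.pyGetD (PySem.List.pyGetD grd i []) j 0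

-- pos.setdefault(grd[i][j], []).append((i, j))  =  modify with default [] appending the cell
def pvPos (grd : List (List Int)) (n : Int) : PySem.Dict Int (List (Int × Int)) :=
  (PySem.List.pyRange 0 n 1).foldl (fun d i =>
      (PySem.List.pyRange 0 n 1).foldl (fun d j =>
        d.modify (pvVal grd i j) [] (fun l => l ++ [(i, j)])) d)
    PySem.Dict.empty

def pvAddNbrs (grd : List (List Int)) (n a : Int)
    (s : PySem.Set Int) (c : Int × Int) : PySem.Set Int :=
  [(c.1 + 1, c.2), (c.1 - 1, c.2), (c.1, c.2 + 1), (c.1, c.2 - 1)].foldl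
    (fun s q =>
      if 0 ≤ q.1 ∧ q.1 < n ∧ 0 ≤ q.2 ∧ q.2 < n ∧ pvVal grd q.1 q.2 ≠ a
      then PySem.Set.add s (pvVal grd q.1 q.2) else s) s

def pvSetOf (grd : List (List Int)) (n a : Int) (cells : List (Int × Int)) : PySem.Set Int :=
  cells.foldl (pvAddNbrs grd n a) PySem.Set.empty

def bl_cns_alt (grd : List (List Int)) (n : Int) : List (Int × List Int) :=
  ((pvPos grd n).items.foldl (fun r p => r.insert p.1 (pvSetOf grd n p.1 p.2))
    PySem.Dict.empty).items

-- ===== PRECONDITION & SPEC =====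
-- Pre_ excludes exactly the inputs on which A raises IndexError: A reads grd[i][j] for all 0 ≤ i, j < n.
def Pre_bl_cns (grd : List (List Int)) (n : Int) : Prop :=
  n ≤ (grd.length : Int) ∧ ∀ r ∈ grd.take n.toNat, n ≤ (r.length : Int)
instance (grd : List (List Int)) (n : Int) : Decidable (Pre_bl_cns grd n) := by unfold Pre_bl_cns; infer_instance

def pvWitness_bl_cns : List (List Int) × Int := ([[1, 2], [3, 1]], 2)

def Spec_bl_cns (grd : List (List Int)) (n : Int) (out : List (Int × List Int)) : Prop := out = bl_cns_alt grd n
instance (grd : List (List Int)) (n : Int) (out : List (Int × List Int)) : Decidable (Spec_bl_cns grd n out) := by unfold Spec_bl_cns; infer_instance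

-- ===== CLAIM (what is proved, stated in full; the proofs are below) =====
def Claim_equal_bl_cns : Prop := ∀ (grd : List (List Int)) (n : Int), Dom_bl_cns grd n → Pre_bl_cns grd n → Spec_bl_cns grd n (bl_cns grd n)

-- ===== LEMMAS AND PROOFS =====

-- proof-side helpers: the per-cell (value, filtered neighbour values) pair stream both programs reduce
def pvNbrs (grd : List (List Int)) (n i j a : Int) : List Int :=
  [(i + 1, j), (i - 1, j), (i, j + 1), (i, j - 1)].foldl
    (fun out (p : Int × Int) =>
      if 0 ≤ p.1 ∧ p.1 < n ∧ 0 ≤ p.2 ∧ p.2 < n ∧ PySem.List.pyGetD (PySem.List.pyGetD grd p.1 []) p.2 0 ≠ a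
      then out ++ [PySem.List.pyGetD (PySem.List.pyGetD grd p.1 []) p.2 0] else out) []

def pvMerge (cnt : PySem.Dict Int (PySem.Set Int)) (p : Int × List Int) : PySem.Dict Int (PySem.Set Int) :=
  if cnt.contains p.1 then cnt.modify p.1 [] (fun s => PySem.Set.update s p.2)
  else cnt.insert p.1 (PySem.Set.ofList p.2)

def pvL (n : Int) : List (Int × Int) :=
  (PySem.List.pyRange 0 n 1).flatMap (fun i => (PySem.List.pyRange 0 n 1).map (fun j => (i, j)))

-- adding elements one by one into the set stored at key a, starting from an insert, is one insert of the updated set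
theorem pv_adds_insert (a : Int) :
    ∀ (bs : List Int) (c : PySem.Dict Int (PySem.Set Int)) (v : PySem.Set Int),
      bs.foldl (fun c b => c.modify a [] (fun s => PySem.Set.add s b)) (c.insert a v)
        = c.insert a (PySem.Set.update v bs) := by
  intro bs
  induction bs with
  | nil => intro c v; rfl
  | cons b bs ih =>
    intro c v
    simp only [List.foldl_cons]
    have h1 : (c.insert a v).modify a [] (fun s => PySem.Set.add s b)
        = c.insert a (PySem.Set.add v b) := by
      show (c.insert a v).insert a _ = _
      rw [PySem.Dict.getD_insert_self, PySem.Dict.insert_insert_self]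
    rw [h1, ih]
    rfl

-- re-inserting the stored value at a present key is a no-op
theorem pv_insert_getD_of_contains (c : PySem.Dict Int (PySem.Set Int)) (a : Int)
    (h : c.contains a = true) (hnd : c.keys.Nodup) :
    c.insert a (c.getD a []) = c := by
  apply PySem.Dict.ext
  rw [PySem.Dict.items_insert_of_contains c (c.getD a []) h]
  conv_rhs => rw [← List.map_id c.items]
  apply List.map_congr_left
  intro p hp
  by_cases hk : p.1 = a
  · have hmem : (a, p.2) ∈ c.items := by rw [← hk]; exact hp
    have hv : c.getD a [] = p.2 := PySem.Dict.getD_of_mem_items c hmem hnd []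
    simp only [hk, hv, BEq.rfl, if_pos]
    exact Prod.ext hk.symm rfl
  · simp [hk]

theorem pv_nodup_merge (c : PySem.Dict Int (PySem.Set Int)) (p : Int × List Int)
    (h : c.keys.Nodup) : (pvMerge c p).keys.Nodup := by
  unfold pvMerge
  split
  · exact PySem.Dict.nodup_keys_insert _ _ _ h
  · exact PySem.Dict.nodup_keys_insert _ _ _ h

-- the per-cell step of A equals the per-pair merge step
theorem pv_cell_eq (grd : List (List Int)) (n i j : Int)
    (c : PySem.Dict Int (PySem.Set Int)) (hnd : c.keys.Nodup) :
    pvCellA grd n c i j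
      = pvMerge c (PySem.List.pyGetD (PySem.List.pyGetD grd i []) j 0,
          pvNbrs grd n i j (PySem.List.pyGetD (PySem.List.pyGetD grd i []) j 0)) := by
  set a := PySem.List.pyGetD (PySem.List.pyGetD grd i []) j 0 with ha
  set v : Int × Int → Int := fun p => PySem.List.pyGetD (PySem.List.pyGetD grd p.1 []) p.2 0 with hv
  set C : List (Int × Int) := [(i + 1, j), (i - 1, j), (i, j + 1), (i, j - 1)] with hC
  set L : List Int :=
    (C.filter (fun p => decide ((0 ≤ p.1 ∧ p.1 < n ∧ 0 ≤ p.2 ∧ p.2 < n) ∧ v p ≠ a))).map v with hL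
  have hB : pvNbrs grd n i j a = L := by
    unfold pvNbrs
    rw [PySem.List.foldl_append_ite
          (p := fun p : Int × Int => 0 ≤ p.1 ∧ p.1 < n ∧ 0 ≤ p.2 ∧ p.2 < n ∧
                  PySem.List.pyGetD (PySem.List.pyGetD grd p.1 []) p.2 0 ≠ a)
          (f := fun p : Int × Int => PySem.List.pyGetD (PySem.List.pyGetD grd p.1 []) p.2 0)]
    rw [List.nil_append, hL, hC]
    apply congrArg
    apply List.filter_congr
    intro x _
    simp only [decide_eq_decide]
    constructor
    · rintro ⟨h1, h2, h3, h4, h5⟩; exact ⟨⟨h1, h2, h3, h4⟩, h5⟩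
    · rintro ⟨⟨h1, h2, h3, h4⟩, h5⟩; exact ⟨h1, h2, h3, h4, h5⟩
  have hA : ∀ c1 : PySem.Dict Int (PySem.Set Int),
      pvDrs.foldl (pvDirStep grd n a i j) c1
        = L.foldl (fun c b => c.modify a [] (fun s => PySem.Set.add s b)) c1 := by
    intro c1
    have hmap : C = pvDrs.map (fun d : Int × Int => (i + d.1, j + d.2)) := by
      simp [pvDrs, hC, sub_eq_add_neg]
    have step1 : pvDrs.foldl (pvDirStep grd n a i j) c1
        = pvDrs.foldl (fun c d =>
            if (0 ≤ i + d.1 ∧ i + d.1 < n ∧ 0 ≤ j + d.2 ∧ j + d.2 < n) ∧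
                v (i + d.1, j + d.2) ≠ a then
              c.modify a [] (fun s => PySem.Set.add s (v (i + d.1, j + d.2)))
            else c) c1 := by
      apply PySem.List.foldl_congr_mem
      intro acc d _
      unfold pvDirStep
      simp only [hv]
      split_ifs <;> first | rfl | omega
    rw [step1]
    rw [PySem.List.foldl_ite_eq_foldl_filter
          (p := fun d : Int × Int => (0 ≤ i + d.1 ∧ i + d.1 < n ∧ 0 ≤ j + d.2 ∧ j + d.2 < n) ∧
                  v (i + d.1, j + d.2) ≠ a)
          (f := fun (c : PySem.Dict Int (PySem.Set Int)) (d : Int × Int) =>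
                  c.modify a [] (fun s => PySem.Set.add s (v (i + d.1, j + d.2))))]
    rw [hL, hmap, List.filter_map, List.map_map, List.foldl_map]
    rfl
  have hcell : pvCellA grd n c i j
      = pvDrs.foldl (pvDirStep grd n a i j)
          (if c.contains a = true then c else c.insert a PySem.Set.empty) := rfl
  rw [hcell]
  by_cases hc : c.contains a = true
  · rw [if_pos hc, hA, hB]
    conv_lhs => rw [← pv_insert_getD_of_contains c a hc hnd]
    rw [pv_adds_insert]
    unfold pvMerge
    rw [if_pos hc]
    rfl
  · rw [if_neg hc, hA, hB, pv_adds_insert]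
    unfold pvMerge
    rw [if_neg hc]
    rfl

-- A's whole dict is the merge-fold over the row-major cell stream
theorem pv_A_eq_merge_fold (grd : List (List Int)) (n : Int) :
    bl_cns grd n
      = (((pvL n).map (fun c => (pvVal grd c.1 c.2, pvNbrs grd n c.1 c.2 (pvVal grd c.1 c.2)))).foldl
          pvMerge PySem.Dict.empty).items := by
  unfold bl_cns pvL
  rw [List.foldl_map, List.foldl_flatMap]
  apply congrArg PySem.Dict.items
  have main : ∀ (I J : List Int) (c : PySem.Dict Int (PySem.Set Int)), c.keys.Nodup →
      I.foldl (fun c i => J.foldl (fun c j => pvCellA grd n c i j) c) c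
        = I.foldl (fun c i => (J.map (fun j => (i, j))).foldl
            (fun c p => pvMerge c (pvVal grd p.1 p.2, pvNbrs grd n p.1 p.2 (pvVal grd p.1 p.2))) c) c := by
    intro I J
    induction I with
    | nil => intro c _; rfl
    | cons i I ih =>
      intro c hnd
      simp only [List.foldl_cons]
      have hrow : ∀ (J' : List Int) (c' : PySem.Dict Int (PySem.Set Int)), c'.keys.Nodup →
          J'.foldl (fun c j => pvCellA grd n c i j) c'
            = (J'.map (fun j => (i, j))).foldl
                (fun c p => pvMerge c (pvVal grd p.1 p.2, pvNbrs grd n p.1 p.2 (pvVal grd p.1 p.2))) c'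
          ∧ (J'.foldl (fun c j => pvCellA grd n c i j) c').keys.Nodup := by
        intro J'
        induction J' with
        | nil => intro c' h; exact ⟨rfl, h⟩
        | cons j J' ihj =>
          intro c' h
          simp only [List.foldl_cons, List.map_cons]
          have hstep := pv_cell_eq grd n i j c' h
          have hnd' : (pvCellA grd n c' i j).keys.Nodup := by
            rw [hstep]; exact pv_nodup_merge _ _ h
          obtain ⟨e, nd⟩ := ihj (pvCellA grd n c' i j) hnd'
          refine ⟨?_, nd⟩
          rw [e, hstep]
          rfl
      obtain ⟨e, _⟩ := hrow J c hnd
      rw [e, ← e]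
      exact ih _ (hrow J c hnd).2
  exact main _ _ PySem.Dict.empty PySem.Dict.nodup_keys_empty

-- characterization of the merge-fold: keys in first-occurrence order, each value the
-- deduplicated concatenation of its own pairs' neighbour lists
theorem pv_merge_char :
    ∀ (ps : List (Int × List Int)) (d : PySem.Dict Int (PySem.Set Int)), d.keys.Nodup →
      (ps.foldl pvMerge d).items
        = (PySem.Set.update d.keys (ps.map Prod.fst)).map
            (fun a => (a, PySem.Set.update (d.getD a [])
                ((ps.filter (fun p => p.1 == a)).flatMap Prod.snd))) := by
  intro ps
  induction ps with
  | nil =>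
    intro d hnd
    simp only [List.foldl_nil, List.map_nil, List.filter_nil, List.flatMap_nil]
    have : PySem.Set.update d.keys [] = d.keys := rfl
    rw [this]
    have : ∀ s : PySem.Set Int, PySem.Set.update s [] = s := fun _ => rfl
    simp only [this]
    exact PySem.Dict.items_eq_map_keys d hnd []
  | cons p ps ih =>
    intro d hnd
    obtain ⟨a, ns⟩ := p
    simp only [List.foldl_cons]
    rw [ih (pvMerge d (a, ns)) (pv_nodup_merge d (a, ns) hnd)]
    have hkeys : (pvMerge d (a, ns)).keys = PySem.Set.add d.keys a := by
      unfold pvMerge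
      by_cases hc : d.contains a = true
      · rw [if_pos hc]
        have h1 : (d.modify a [] fun s => PySem.Set.update s ns)
            = d.insert a (PySem.Set.update (d.getD a []) ns) := rfl
        have : a ∈ d.keys := (PySem.Dict.contains_iff_mem_keys d a).mp hc
        rw [h1]
        simp [PySem.Dict.keys_insert_of_contains, hc, PySem.Set.add, PySem.Set.contains, this]
      · rw [if_neg hc, PySem.Dict.keys_insert_of_not_contains d _ (by simpa using hc)]
        have : a ∉ d.keys := fun hm => hc ((PySem.Dict.contains_iff_mem_keys d a).mpr hm)
        simp [PySem.Set.add, PySem.Set.contains, this]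
    have hgetD : ∀ x : Int, (pvMerge d (a, ns)).getD x []
        = if x = a then PySem.Set.update (d.getD a []) ns else d.getD x [] := by
      intro x
      unfold pvMerge
      by_cases hc : d.contains a = true
      · rw [if_pos hc, PySem.Dict.getD_modify]
      · rw [if_neg hc, PySem.Dict.getD_insert]
        by_cases hx : x = a
        · rw [if_pos hx, if_pos hx,
              PySem.Dict.getD_of_not_contains d (k := a) [] (by simpa using hc)]
          rfl
        · rw [if_neg hx, if_neg hx]
    have hupd : PySem.Set.update (PySem.Set.add d.keys a) (ps.map Prod.fst)
        = PySem.Set.update d.keys (((a, ns) :: ps).map Prod.fst) := rfl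
    rw [hkeys, hupd]
    apply List.map_congr_left
    intro x _
    by_cases hx : x = a
    · subst hx
      have hfilter : (((x, ns) :: ps).filter (fun p => p.1 == x))
          = (x, ns) :: ps.filter (fun p => p.1 == x) := by
        simp
      rw [hgetD x, if_pos rfl, hfilter]
      simp only [List.flatMap_cons]
      have : ∀ (s : PySem.Set Int) (l1 l2 : List Int),
          PySem.Set.update s (l1 ++ l2) = PySem.Set.update (PySem.Set.update s l1) l2 := by
        intro s l1 l2
        simp [PySem.Set.update, List.foldl_append]
      rw [this]
    · have hfilter : (((a, ns) :: ps).filter (fun p => p.1 == x))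
          = ps.filter (fun p => p.1 == x) := by
        have : ((a, ns).1 == x) = false := by
          simp only [beq_eq_false_iff_ne]
          exact fun h => hx h.symm
        simp [this]
      rw [hgetD x, if_neg hx, hfilter]

-- B's position index as a single fold over the cell stream
theorem pv_pos_eq_fold (grd : List (List Int)) (n : Int) :
    pvPos grd n
      = (pvL n).foldl (fun d c => d.modify (pvVal grd c.1 c.2) [] (fun l => l ++ [c]))
          PySem.Dict.empty := by
  unfold pvPos pvL
  rw [List.foldl_flatMap]
  simp only [List.foldl_map]

-- the two sides of the per-value set computation
theorem pv_setOf_eq (grd : List (List Int)) (n a : Int) :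
    ∀ (cells : List (Int × Int)) (s : PySem.Set Int),
      cells.foldl (pvAddNbrs grd n a) s
        = PySem.Set.update s (cells.flatMap (fun c => pvNbrs grd n c.1 c.2 a)) := by
  have hcell : ∀ (c : Int × Int) (s : PySem.Set Int),
      pvAddNbrs grd n a s c = PySem.Set.update s (pvNbrs grd n c.1 c.2 a) := by
    intro c s
    unfold pvAddNbrs pvNbrs
    rw [PySem.List.foldl_append_ite
          (p := fun p : Int × Int => 0 ≤ p.1 ∧ p.1 < n ∧ 0 ≤ p.2 ∧ p.2 < n ∧
                  PySem.List.pyGetD (PySem.List.pyGetD grd p.1 []) p.2 0 ≠ a)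
          (f := fun p : Int × Int => PySem.List.pyGetD (PySem.List.pyGetD grd p.1 []) p.2 0)]
    rw [PySem.List.foldl_ite_eq_foldl_filter
          (p := fun q : Int × Int => 0 ≤ q.1 ∧ q.1 < n ∧ 0 ≤ q.2 ∧ q.2 < n ∧ pvVal grd q.1 q.2 ≠ a)
          (f := fun (s : PySem.Set Int) (q : Int × Int) => PySem.Set.add s (pvVal grd q.1 q.2))]
    rw [List.nil_append]
    unfold pvVal
    simp [PySem.Set.update, List.foldl_map]
  intro cells
  induction cells with
  | nil => intro s; rfl
  | cons c cells ih =>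
    intro s
    simp only [List.foldl_cons, List.flatMap_cons]
    rw [hcell c s, ih]
    simp [PySem.Set.update, List.foldl_append]

theorem pv_nodup_keys_pos (grd : List (List Int)) (n : Int) : (pvPos grd n).keys.Nodup := by
  rw [pv_pos_eq_fold]
  exact PySem.Dict.nodup_keys_foldl_modify_key (pvL n) (fun c => pvVal grd c.1 c.2) []
    (fun _ c => (· ++ [c])) PySem.Dict.empty PySem.Dict.nodup_keys_empty

-- ===== VERDICT (by name: the statement is the Claim_ definition above) =====
theorem bl_cns_spec : Claim_equal_bl_cns := by
  intro grd n _ _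
  unfold Spec_bl_cns
  rw [pv_A_eq_merge_fold]
  rw [pv_merge_char _ PySem.Dict.empty PySem.Dict.nodup_keys_empty]
  -- B side
  unfold bl_cns_alt
  have hposkeys : (pvPos grd n).keys = PySem.Set.ofList ((pvL n).map (fun c => pvVal grd c.1 c.2)) := by
    rw [pv_pos_eq_fold,
        PySem.Dict.keys_foldl_modify_key (pvL n) (fun c => pvVal grd c.1 c.2) []
          (fun _ c => (· ++ [c])) PySem.Dict.empty]
    rfl
  have hposgetD : ∀ a : Int, (pvPos grd n).getD a []
      = (pvL n).filter (fun c => pvVal grd c.1 c.2 == a) := by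
    intro a
    rw [pv_pos_eq_fold]
    have : ((pvL n).foldl (fun d c => d.modify (pvVal grd c.1 c.2) [] (fun l => l ++ [c]))
        PySem.Dict.empty)
        = (((pvL n).map (fun c => (pvVal grd c.1 c.2, c))).foldl
            (fun d p => d.modify p.1 [] (fun l => l ++ [p.2])) PySem.Dict.empty) := by
      rw [List.foldl_map]
    rw [this, PySem.Dict.getD_foldl_modify_append, PySem.Dict.getD_empty, List.nil_append,
        List.filter_map, List.map_map]
    simp only [Function.comp_def]
    exact (List.map_id' _).symm ▸ rfl
  have hres : ((pvPos grd n).items.foldl (fun r p => r.insert p.1 (pvSetOf grd n p.1 p.2))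
        PySem.Dict.empty).items
      = (pvPos grd n).items.map (fun p => (p.1, pvSetOf grd n p.1 p.2)) := by
    have hnd : ((pvPos grd n).items.map Prod.fst).Nodup := by
      have := pv_nodup_keys_pos grd n
      simpa [PySem.Dict.keys] using this
    rw [PySem.Dict.items_foldl_insert_fresh (pvPos grd n).items Prod.fst
          (fun p => pvSetOf grd n p.1 p.2) PySem.Dict.empty
          (fun p _ => PySem.Dict.contains_empty p.1) hnd]
    exact List.nil_append _

  rw [hres, PySem.Dict.items_eq_map_keys (pvPos grd n) (pv_nodup_keys_pos grd n) [],
      List.map_map, hposkeys, List.map_map]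
  have hcompA : (Prod.fst ∘ fun c : Int × Int =>
      (pvVal grd c.1 c.2, pvNbrs grd n c.1 c.2 (pvVal grd c.1 c.2))) = fun c => pvVal grd c.1 c.2 := rfl
  rw [hcompA]
  apply List.map_congr_left
  intro a _
  simp only [Function.comp_def]
  rw [hposgetD a]
  congr 1
  -- value at key a: A's dedup of the concatenated neighbour lists = B's per-value set
  unfold pvSetOf
  rw [pv_setOf_eq grd n a ((pvL n).filter (fun c => pvVal grd c.1 c.2 == a)) PySem.Set.empty]
  have hfilt : (((pvL n).map (fun c => (pvVal grd c.1 c.2, pvNbrs grd n c.1 c.2 (pvVal grd c.1 c.2)))).filter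
        (fun p => p.1 == a))
      = ((pvL n).filter (fun c => pvVal grd c.1 c.2 == a)).map
          (fun c => (pvVal grd c.1 c.2, pvNbrs grd n c.1 c.2 (pvVal grd c.1 c.2))) := by
    rw [List.filter_map]
    rfl
  rw [hfilt]
  have hflat : (((pvL n).filter (fun c => pvVal grd c.1 c.2 == a)).map
        (fun c => (pvVal grd c.1 c.2, pvNbrs grd n c.1 c.2 (pvVal grd c.1 c.2)))).flatMap Prod.snd
      = ((pvL n).filter (fun c => pvVal grd c.1 c.2 == a)).flatMap
          (fun c => pvNbrs grd n c.1 c.2 a) := by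
    rw [List.flatMap_map]
    apply List.flatMap_congr
    intro c hc
    have : pvVal grd c.1 c.2 = a := by
      have := (List.mem_filter.mp hc).2
      exact eq_of_beq this
    rw [this]
  rw [hflat]
  rfl
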